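-- pv_equiv track=rewrite | github.com/KiteAB/.config | blender/2.82/scripts/addons/MCprep_addon/__init__.py | nameGeneralize
-- ===== SOURCE A (Python) =====
-- def nameGeneralize(name):
-- 	nameList = name.split(".")
-- 	#check last item in list, to see if numeric type e.g. from .001
-- 	try:
-- 		x = int(nameList[-1])
-- 		name = nameList[0]
-- 		for a in nameList[1:-1]: name+='.'+a
-- 	except:
-- 		pass
-- 	return name
-- ===== SOURCE B (Python) =====
-- def nameGeneralize(name):
-- 	head, sep, tail = name.rpartition('.')
-- 	try:
-- 		int(tail)
-- 	except ValueError: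
-- 		return name
-- 	return head if sep else name
-- ===== Notes on version B (the rewrite author's own statement) =====
-- stated objective: simpler
-- what changed: B replaces A's split-on-every-dot plus a rejoin loop over all middle parts by a single right-partition at the last dot, returning the head directly when the tail parses as an int.
import Mathlib
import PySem

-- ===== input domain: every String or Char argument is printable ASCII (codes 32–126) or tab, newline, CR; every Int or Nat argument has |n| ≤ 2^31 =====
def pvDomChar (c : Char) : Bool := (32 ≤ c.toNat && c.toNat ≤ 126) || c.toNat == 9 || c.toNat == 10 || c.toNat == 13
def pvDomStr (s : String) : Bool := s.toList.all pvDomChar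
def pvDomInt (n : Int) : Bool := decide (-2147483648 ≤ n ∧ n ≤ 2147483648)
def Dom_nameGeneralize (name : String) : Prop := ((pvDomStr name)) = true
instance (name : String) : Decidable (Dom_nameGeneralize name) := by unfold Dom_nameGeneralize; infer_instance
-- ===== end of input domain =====

-- B replaces A's split-into-all-parts + rejoin loop by a single right-partition at
-- the last dot, returning the head directly (objective: simpler).

-- ===== PORT A =====
-- Python's bare `except: pass` swallows any failure inside the try block
-- (IndexError from nameList[-1]/nameList[0] or ValueError from int), so every
-- `none` from a primitive returns the original name.
def nameGeneralize (name : String) : String :=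
  -- nameList = name.split(".")  (inlined at each use)
  match PySem.List.pyGet? (PySem.Chars.splitOn name.toList ['.']) (-1) with
  | none => name
  | some last =>
    match PySem.Int.ofChars? last with
    | none => name
    | some _ =>
      match PySem.List.pyGet? (PySem.Chars.splitOn name.toList ['.']) 0 with
      | none => name
      | some h =>
        String.ofList (List.foldl (fun acc a => acc ++ '.' :: a)
          h (PySem.List.slice (PySem.Chars.splitOn name.toList ['.']) (some 1) (some (-1))))

-- ===== PORT B =====
-- name.rpartition('.') ported by hand (PySem has no rpartition): scan the
-- reversed character list for the first '.'; exact — tail = chars after the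
-- last dot, head = chars before it, rest = [] means no dot was present.
def nameGeneralize_alt (name : String) : String :=
  -- tailRev/rest = the reversed tail after the last '.', and the rest (inlined)
  match PySem.Int.ofChars? (name.toList.reverse.takeWhile (fun c => decide (c ≠ '.'))).reverse with
  | none => name
  | some _ =>
    match name.toList.reverse.dropWhile (fun c => decide (c ≠ '.')) with
    | [] => name
    | _ :: headRev => String.ofList headRev.reverse

-- ===== PRECONDITION & SPEC =====
def Spec_nameGeneralize (name : String) (out : String) : Prop := out = nameGeneralize_alt name
instance (name : String) (out : String) : Decidable (Spec_nameGeneralize name out) := by unfold Spec_nameGeneralize; infer_instance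

-- ===== CLAIM (what is proved, stated in full; the proofs are below) =====
def Claim_equal_nameGeneralize : Prop := ∀ (name : String), Dom_nameGeneralize name → Spec_nameGeneralize name (nameGeneralize name)

-- ===== LEMMAS AND PROOFS =====

-- A clean structural version of splitting at '.', used only in the proofs.
def splitD : List Char → List (List Char)
  | [] => [[]]
  | c :: rest =>
    let r := splitD rest
    if c = '.' then [] :: r else (c :: r.headI) :: r.tail

theorem splitD_ne_nil (l : List Char) : splitD l ≠ [] := by
  cases l with
  | nil => simp [splitD]
  | cons c rest => simp only [splitD]; split <;> simp

theorem headI_tail_cons {α : Type} [Inhabited α] (l : List α) (h : l ≠ []) :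
    l.headI :: l.tail = l := by
  cases l with
  | nil => exact absurd rfl h
  | cons a t => rfl

theorem headI_append_left {α : Type} [Inhabited α] (l l' : List α) (h : l ≠ []) :
    (l ++ l').headI = l.headI := by
  cases l with
  | nil => exact absurd rfl h
  | cons a t => rfl

theorem splitOn_go_eq (l cur : List Char) (acc : List (List Char)) (fuel : Nat)
    (h : l.length < fuel) :
    PySem.Chars.splitOn.go ['.'] fuel l cur acc
      = acc.reverse ++ (cur.reverse ++ (splitD l).headI) :: (splitD l).tail := by
  induction l generalizing cur acc fuel with
  | nil =>
    cases fuel with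
    | zero => omega
    | succ f => simp [PySem.Chars.splitOn.go, splitD]
  | cons c rest ih =>
    cases fuel with
    | zero => omega
    | succ f =>
      have hf : rest.length < f := by simpa using h
      by_cases hc : c = '.'
      · subst hc
        rw [show PySem.Chars.splitOn.go ['.'] (f + 1) ('.' :: rest) cur acc
            = PySem.Chars.splitOn.go ['.'] f rest [] (cur.reverse :: acc) by
          simp [PySem.Chars.splitOn.go, List.isPrefixOf]]
        rw [ih [] (cur.reverse :: acc) f hf]
        simp [splitD, headI_tail_cons _ (splitD_ne_nil rest)]
      · rw [show PySem.Chars.splitOn.go ['.'] (f + 1) (c :: rest) cur acc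
            = PySem.Chars.splitOn.go ['.'] f rest (c :: cur) acc by
          have hp : List.isPrefixOf ['.'] (c :: rest) = false := by
            simp [List.isPrefixOf]; exact fun h => hc h.symm
          simp [PySem.Chars.splitOn.go, hp]]
        rw [ih (c :: cur) acc f hf]
        simp [splitD, hc]

theorem splitOn_eq_splitD (l : List Char) :
    PySem.Chars.splitOn l ['.'] = (splitD l).headI :: (splitD l).tail := by
  have := splitOn_go_eq l [] [] (l.length + 1) (by omega)
  simpa [PySem.Chars.splitOn] using this

theorem splitD_no_dot (ys : List Char) (h : '.' ∉ ys) : splitD ys = [ys] := by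
  induction ys with
  | nil => simp [splitD]
  | cons c rest ih =>
    simp only [List.mem_cons, not_or] at h
    simp [splitD, Ne.symm h.1, ih h.2]

theorem splitD_append_dot (xs ys : List Char) (h : '.' ∉ ys) :
    splitD (xs ++ '.' :: ys) = splitD xs ++ [ys] := by
  induction xs with
  | nil => simp [splitD, splitD_no_dot ys h]
  | cons c xs ih =>
    by_cases hc : c = '.'
    · simp [splitD, hc, ih]
    · have hne := splitD_ne_nil xs
      simp [splitD, hc, ih, headI_append_left _ _ hne,
        List.tail_append_of_ne_nil hne]

theorem joinD (l : List Char) (pre : List Char) :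
    List.foldl (fun acc a => acc ++ '.' :: a) (pre ++ (splitD l).headI) (splitD l).tail
      = pre ++ l := by
  induction l generalizing pre with
  | nil => simp [splitD]
  | cons c rest ih =>
    by_cases hc : c = '.'
    · subst hc
      have hne := splitD_ne_nil rest
      obtain ⟨p, ps, hps⟩ := List.exists_cons_of_ne_nil hne
      simp only [splitD, List.headI_cons, List.tail_cons, hps]
      have := ih (pre ++ ['.'])
      rw [hps] at this
      simpa using this
    · have hne := splitD_ne_nil rest
      simp only [splitD, if_neg hc]
      have := ih (pre ++ [c])
      simp only [List.append_assoc] at this ⊢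
      simpa using this

theorem slice_one_negOne {α : Type} (l : List α) :
    PySem.List.slice l (some 1) (some (-1)) = l.tail.dropLast := by
  cases l with
  | nil => simp [PySem.List.slice, PySem.List.clampIdx]
  | cons a t =>
    simp only [PySem.List.slice, PySem.List.clampIdx]
    cases t with
    | nil => simp
    | cons b u =>
      simp only [List.length_cons]
      rw [if_pos (by omega : (-1 : Int) < 0)]
      rw [if_neg (by push_cast; omega : ¬ (((u.length + 1 + 1 : Nat) : Int) + -1 < 0))]
      rw [if_neg (by omega : ¬ ((1 : Int) < 0))]
      have hmin : min (Int.toNat 1) (u.length + 1 + 1) = 1 := by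
        simp [Int.toNat]
      rw [hmin]
      have hnat : (((u.length + 1 + 1 : Nat) : Int) + -1).toNat = u.length + 1 := by omega
      rw [hnat]
      simp [List.dropLast_eq_take]

-- core equivalence on the underlying character list
theorem nameGeneralize_eq (name : String) :
    nameGeneralize name = nameGeneralize_alt name := by
  unfold nameGeneralize nameGeneralize_alt
  set cs := name.toList with hcs
  set t := cs.reverse.takeWhile (fun c => decide (c ≠ '.')) with ht
  set rest := cs.reverse.dropWhile (fun c => decide (c ≠ '.')) with hrest
  have hsplit : t ++ rest = cs.reverse := List.takeWhile_append_dropWhile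
  have htno : '.' ∉ t.reverse := by
    intro hmem
    have h2 := List.mem_takeWhile_imp (l := cs.reverse) (p := fun c => decide (c ≠ '.'))
      (by simpa [ht] using hmem)
    simp at h2
  cases hr : rest with
  | nil =>
    have hteq : t = cs.reverse := by
      have := hsplit; rw [hr] at this; simpa using this
    have hnodot : '.' ∉ cs := fun hmem => htno (by simpa [hteq] using hmem)
    have hs : splitD cs = [cs] := splitD_no_dot cs hnodot
    rw [splitOn_eq_splitD, hs]
    simp only [List.headI_cons, List.tail_cons, hteq, List.reverse_reverse]
    have hget : PySem.List.pyGet? [cs] (-1) = some cs := by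
      simp [PySem.List.pyGet?, PySem.List.pyIdx?]
    rw [hget]
    cases hof : PySem.Int.ofChars? cs with
    | none => simp [hof]
    | some n =>
      have hof' : PySem.Int.ofChars? name.toList = some n := hof
      simp [hof', slice_one_negOne, hcs]
  | cons d hrv =>
    have hw : rest ≠ [] := by rw [hr]; simp
    have hdw : List.dropWhile (fun c => decide (c ≠ '.')) cs.reverse = d :: hrv := by
      rw [← hrest]; exact hr
    have hd : d = '.' := by
      have h3 := List.head_dropWhile_not (fun c => decide (c ≠ '.')) (l := cs.reverse)
        (w := by rw [hdw]; simp)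
      simp only [hdw, List.head_cons] at h3
      simpa using h3
    subst hd
    have hcs2 : cs = hrv.reverse ++ '.' :: t.reverse := by
      have h2 : cs.reverse = t ++ '.' :: hrv := by rw [← hsplit, hr]
      have h4 := congrArg List.reverse h2
      simpa using h4
    have hsd : splitD cs = splitD hrv.reverse ++ [t.reverse] := by
      rw [hcs2]; exact splitD_append_dot _ _ htno
    have hne := splitD_ne_nil hrv.reverse
    rw [splitOn_eq_splitD, hsd, headI_append_left _ _ hne,
      List.tail_append_of_ne_nil hne]
    have hget : PySem.List.pyGet?
        ((splitD hrv.reverse).headI :: ((splitD hrv.reverse).tail ++ [t.reverse])) (-1)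
        = some t.reverse := by
      rw [show (splitD hrv.reverse).headI :: ((splitD hrv.reverse).tail ++ [t.reverse])
          = ((splitD hrv.reverse).headI :: (splitD hrv.reverse).tail) ++ [t.reverse] by simp]
      simp [PySem.List.pyGet?, PySem.List.pyIdx?]
    rw [hget]
    cases hof : PySem.Int.ofChars? t.reverse with
    | none => simp [hof]
    | some n =>
      have hget0 : PySem.List.pyGet?
          ((splitD hrv.reverse).headI :: ((splitD hrv.reverse).tail ++ [t.reverse])) 0
          = some (splitD hrv.reverse).headI := by
        have hpos : (0:Int) ≤ (((splitD hrv.reverse).length - 1 : Nat) : Int) + 1 := by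
          positivity
        simp [PySem.List.pyGet?, PySem.List.pyIdx?, hpos]
      have hfold := joinD hrv.reverse []
      simp only [List.nil_append] at hfold
      simp [hof, hget0, slice_one_negOne, hfold]

-- ===== VERDICT (by name: the statement is the Claim_ definition above) =====
theorem nameGeneralize_spec : Claim_equal_nameGeneralize := by
  intro name _
  unfold Spec_nameGeneralize
  exact nameGeneralize_eq name
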